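-- pv_equiv track=rewrite | github.com/iagorrr/Competitive-Programming-Library | submissions/Becrowd/_1159(2).py | sumEven5
-- ===== SOURCE A (Python) =====
-- def sumEven5(X):
--     totSum = 0
--     evens = 0
--     numTemp = X
--
--     while(evens < 5):
--         if numTemp % 2 == 0:
--             totSum += numTemp
--             evens += 1
--
--         numTemp += 1
--
--     return totSum
-- ===== SOURCE B (Python) =====
-- def sumEven5(X):
--     e = X if X % 2 == 0 else X + 1
--     return 5 * e + 20
-- ===== Notes on version B (the rewrite author's own statement) =====
-- stated objective: simpler
-- what changed: Replaces the counting while-loop with a single parity check and the closed-form sum 5*e+20 of the five consecutive evens starting at the first even >= X.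
import Mathlib
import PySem

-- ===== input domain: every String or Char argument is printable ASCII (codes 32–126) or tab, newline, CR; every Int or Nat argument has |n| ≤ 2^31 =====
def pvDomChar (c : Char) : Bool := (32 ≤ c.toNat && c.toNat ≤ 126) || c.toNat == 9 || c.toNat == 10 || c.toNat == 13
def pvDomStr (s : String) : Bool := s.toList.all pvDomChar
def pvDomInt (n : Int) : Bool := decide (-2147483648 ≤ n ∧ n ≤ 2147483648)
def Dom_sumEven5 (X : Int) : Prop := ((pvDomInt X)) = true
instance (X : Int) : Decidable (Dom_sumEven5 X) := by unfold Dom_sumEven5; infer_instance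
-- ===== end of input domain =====

-- B replaces A's counting while-loop with one parity check and the closed form 5*e+20 (objective: simpler).

-- ===== PORT A =====
-- while loop of A: state (totSum, evens, numTemp); evens counted as Nat for termination,
-- the measure decreases because an odd numTemp becomes even on the next step.
def sumEven5Loop (totSum : Int) (evens : Nat) (numTemp : Int) : Int :=
  if h : evens < 5 then
    if h2 : numTemp % 2 == 0 then
      sumEven5Loop (totSum + numTemp) (evens + 1) (numTemp + 1)
    else
      sumEven5Loop totSum evens (numTemp + 1)
  else
    totSum
termination_by 2 * (5 - evens) + (if numTemp % 2 == 0 then 0 else 1)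
decreasing_by
  · have hx : ¬ (2 ∣ (numTemp + 1)) := by simp at h2; omega
    simp_all
    omega
  · have hx : (2 ∣ (numTemp + 1)) := by simp at h2; omega
    simp_all

def sumEven5 (X : Int) : Int := sumEven5Loop 0 0 X

-- ===== PORT B =====
def sumEven5_alt (X : Int) : Int :=
  let e := if X % 2 == 0 then X else X + 1
  5 * e + 20

-- ===== PRECONDITION & SPEC =====
def Spec_sumEven5 (X : Int) (out : Int) : Prop := out = sumEven5_alt X
instance (X : Int) (out : Int) : Decidable (Spec_sumEven5 X out) := by unfold Spec_sumEven5; infer_instance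

-- ===== CLAIM (what is proved, stated in full; the proofs are below) =====
def Claim_equal_sumEven5 : Prop := ∀ (X : Int), Dom_sumEven5 X → Spec_sumEven5 X (sumEven5 X)

-- ===== LEMMAS AND PROOFS =====

-- one even step followed by the forced odd step (or loop exit) of A's loop
theorem sumEven5Loop_step2 (t : Int) (e : Nat) (n : Int) (hn : n % 2 = 0) (he : e < 5) :
    sumEven5Loop t e n = sumEven5Loop (t + n) (e + 1) (n + 2) := by
  have h12 : n + 1 + 1 = n + 2 := by ring
  have hodd : ¬((n + 1) % 2 = 0) := by omega
  by_cases h5 : e + 1 < 5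
  · rw [sumEven5Loop]
    simp [he, hn]
    rw [sumEven5Loop]
    simp [h5, hodd, h12]
  · rw [sumEven5Loop]
    simp [he, hn]
    rw [sumEven5Loop]
    simp [h5]
    rw [sumEven5Loop]
    simp [h5]

theorem sumEven5Loop_done (t : Int) (n : Int) : sumEven5Loop t 5 n = t := by
  rw [sumEven5Loop]; simp

theorem sumEven5Loop_even (t : Int) (n : Int) (hn : n % 2 = 0) :
    sumEven5Loop t 0 n = t + 5 * n + 20 := by
  rw [sumEven5Loop_step2 t 0 n hn (by omega),
      sumEven5Loop_step2 _ 1 _ (by omega) (by omega),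
      sumEven5Loop_step2 _ 2 _ (by omega) (by omega),
      sumEven5Loop_step2 _ 3 _ (by omega) (by omega),
      sumEven5Loop_step2 _ 4 _ (by omega) (by omega),
      sumEven5Loop_done]
  ring

-- ===== VERDICT (by name: the statement is the Claim_ definition above) =====
theorem sumEven5_spec : Claim_equal_sumEven5 := by
  intro X _
  unfold Spec_sumEven5 sumEven5 sumEven5_alt
  by_cases h : X % 2 = 0
  · simp [h, sumEven5Loop_even 0 X h]
  · have h1 : (X + 1) % 2 = 0 := by omega
    rw [sumEven5Loop]
    simp [h, sumEven5Loop_even 0 (X + 1) h1]
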